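-- pv_equiv track=rewrite | github.com/terror/solutions | binarysearch/sinking-islands.py | solve
-- ===== SOURCE A (Python) =====
-- def solve(board):
--   r, c = len(board), len(board[0])
--
--   def dfs(i, j):
--     if i < 0 or i >= r or j < 0 or j >= c:
--       return ([], False)
--
--     if not board[i][j]:
--       return ([], False)
--
--     board[i][j] = 0
--
--     n = dfs(i + 1, j)
--     s = dfs(i - 1, j)
--     e = dfs(i, j + 1)
--     w = dfs(i, j - 1)
--
--     return (
--       (
--         [(i, j)] + n[0] + s[0] + e[0] + w[0],
--         (i - 1 < 0 or i + 1 > r - 1 or j - 1 < 0 or j + 1 > c - 1) | n[1] | s[1] | e[1] | w[1]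
--       )
--     )
--
--   sinks = []
--
--   for i in range(r):
--     for j in range(c):
--       if board[i][j]:
--         result = dfs(i, j)
--         sinks.append((result[0], not result[1]))
--
--   for indicies, sink in sinks:
--     for i, j in indicies:
--       board[i][j] = int(not sink)
--
--   return board
-- ===== SOURCE B (Python) =====
-- def solve(board):
--   r, c = len(board), len(board[0])
--
--   safe = set()
--   stack = [(i, j) for i in range(r) for j in range(c)
--            if (i == 0 or i == r - 1 or j == 0 or j == c - 1) and board[i][j]]
--
--   while stack:
--     i, j = stack.pop()
--     if (i, j) in safe:
--       continue
--     safe.add((i, j))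
--     for ni, nj in ((i + 1, j), (i - 1, j), (i, j + 1), (i, j - 1)):
--       if 0 <= ni < r and 0 <= nj < c and board[ni][nj] and (ni, nj) not in safe:
--         stack.append((ni, nj))
--
--   for i in range(r):
--     for j in range(c):
--       if board[i][j]:
--         board[i][j] = 1 if (i, j) in safe else 0
--
--   return board
-- ===== Notes on version B (the rewrite author's own statement) =====
-- stated objective: faster
-- what changed: Replaces A's per-component recursive DFS (which concatenates component cell lists and rewrites each component afterwards) by a single border-seeded iterative flood fill with an explicit stack and a visited set, followed by one 0/1 write-back sweep.
import Mathlib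
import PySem

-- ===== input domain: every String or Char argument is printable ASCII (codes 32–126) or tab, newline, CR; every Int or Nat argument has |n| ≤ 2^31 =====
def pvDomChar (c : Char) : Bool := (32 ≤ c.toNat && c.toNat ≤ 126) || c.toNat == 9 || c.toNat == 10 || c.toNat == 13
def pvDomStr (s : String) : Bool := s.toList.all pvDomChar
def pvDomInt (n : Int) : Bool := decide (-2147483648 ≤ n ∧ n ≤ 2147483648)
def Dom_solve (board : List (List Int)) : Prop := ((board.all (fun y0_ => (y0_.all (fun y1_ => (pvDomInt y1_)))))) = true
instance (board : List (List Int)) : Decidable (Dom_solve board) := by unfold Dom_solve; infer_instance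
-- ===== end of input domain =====

-- B replaces A's per-component recursive DFS + component rewrite (quadratic list
-- concatenation) by one border-seeded iterative flood fill (explicit stack + visited set)
-- and a single 0/1 write-back sweep (measured faster in a timing run); both Pythons
-- mutate `board` in place, the equivalence proved here is about the return value.

-- ===== PORT A =====
-- board[i][j] read / write (all uses in both ports are guarded to in-range nonnegative indices)
def bget (bd : List (List Int)) (i j : Int) : Int :=
  PySem.List.pyGetD (PySem.List.pyGetD bd i []) j 0

def bset (bd : List (List Int)) (i j : Int) (v : Int) : List (List Int) :=
  PySem.List.pySetD bd i (PySem.List.pySetD (PySem.List.pyGetD bd i []) j v)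

-- number of truthy (nonzero) cells; used only as the fuel bound for dfsA
def countNZ (bd : List (List Int)) : Nat :=
  (bd.map (fun row => (row.filter (fun v => !(v == 0))).length)).sum

-- literal port of A's inner `dfs` (board threaded instead of mutated; fuel only for totality:
-- each recursion level first zeroes a truthy cell, so `countNZ bd + 1` fuel is never exhausted)
def dfsA (fuel : Nat) (r c : Int) (bd : List (List Int)) (i j : Int) :
    List (List Int) × List (Int × Int) × Bool :=
  match fuel with
  | 0 => (bd, [], false)
  | fuel + 1 =>
    if i < 0 ∨ r ≤ i ∨ j < 0 ∨ c ≤ j then (bd, [], false)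
    else if bget bd i j = 0 then (bd, [], false)
    else
      let bd1 := bset bd i j 0
      let n := dfsA fuel r c bd1 (i + 1) j
      let s := dfsA fuel r c n.1 (i - 1) j
      let e := dfsA fuel r c s.1 i (j + 1)
      let w := dfsA fuel r c e.1 i (j - 1)
      (w.1,
       (i, j) :: (n.2.1 ++ s.2.1 ++ e.2.1 ++ w.2.1),
       (decide (i - 1 < 0 ∨ i + 1 > r - 1 ∨ j - 1 < 0 ∨ j + 1 > c - 1)
         || n.2.2 || s.2.2 || e.2.2 || w.2.2))

def solve (board : List (List Int)) : List (List Int) :=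
  let r : Int := (board.length : Int)
  let c : Int := ((PySem.List.pyGetD board 0 []).length : Int)
  let st :=
    (PySem.List.pyRange 0 r 1).foldl (fun st i =>
      (PySem.List.pyRange 0 c 1).foldl (fun st j =>
        if bget st.1 i j ≠ 0 then
          let res := dfsA (countNZ st.1 + 1) r c st.1 i j
          (res.1, st.2 ++ [(res.2.1, !res.2.2)])
        else st) st) (board, ([] : List (List (Int × Int) × Bool)))
  st.2.foldl (fun bd cs =>
    cs.1.foldl (fun bd q => bset bd q.1 q.2 (if cs.2 then 0 else 1)) bd) st.1

-- ===== PORT B =====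
-- literal port of Source B's worklist loop; `stack.pop()` pops the LAST element; fuel is only a
-- totality guard (each iteration pops one entry and a new cell enters `safe` at most once)
def floodB (fuel : Nat) (bd : List (List Int)) (r c : Int)
    (stack : List (Int × Int)) (safe : PySem.Set (Int × Int)) : PySem.Set (Int × Int) :=
  match fuel with
  | 0 => safe
  | fuel + 1 =>
    match stack.getLast? with
    | none => safe
    | some p =>
      let stack := stack.dropLast
      if p ∈ safe then floodB fuel bd r c stack safe
      else
        let safe := PySem.Set.add safe p
        let nbrs :=
          [(p.1 + 1, p.2), (p.1 - 1, p.2), (p.1, p.2 + 1), (p.1, p.2 - 1)].filter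
            (fun q => decide (0 ≤ q.1 ∧ q.1 < r ∧ 0 ≤ q.2 ∧ q.2 < c) &&
                      !(bget bd q.1 q.2 == 0) && !(decide (q ∈ safe)))
        floodB fuel bd r c (stack ++ nbrs) safe

def solve_alt (board : List (List Int)) : List (List Int) :=
  let r : Int := (board.length : Int)
  let c : Int := ((PySem.List.pyGetD board 0 []).length : Int)
  let stack0 :=
    (PySem.List.pyRange 0 r 1).flatMap (fun i =>
      ((PySem.List.pyRange 0 c 1).filter (fun j =>
        (i == 0 || i == r - 1 || j == 0 || j == c - 1) && !(bget board i j == 0))).map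
        (fun j => (i, j)))
  let safe := floodB (stack0.length + 5 * (board.length * (PySem.List.pyGetD board 0 []).length) + 1)
    board r c stack0 PySem.Set.empty
  (PySem.List.pyRange 0 r 1).foldl (fun bd i =>
    (PySem.List.pyRange 0 c 1).foldl (fun bd j =>
      if bget bd i j ≠ 0 then bset bd i j (if (i, j) ∈ safe then 1 else 0) else bd) bd) board

-- ===== PRECONDITION & SPEC =====
-- Pre_ excludes exactly the inputs where A raises IndexError: the empty board (board[0])
-- and boards where some row is shorter than row 0 (A reads board[i][j] for every j < len(board[0])).
def Pre_solve (board : List (List Int)) : Prop :=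
  board ≠ [] ∧ ∀ row ∈ board, (PySem.List.pyGetD board 0 []).length ≤ row.length
instance (board : List (List Int)) : Decidable (Pre_solve board) := by
  unfold Pre_solve; infer_instance

def pvWitness_solve : List (List Int) := [[1, 0, 1], [0, 1, 0], [0, 1, 0]]

def Spec_solve (board : List (List Int)) (out : List (List Int)) : Prop := out = solve_alt board
instance (board : List (List Int)) (out : List (List Int)) : Decidable (Spec_solve board out) := by
  unfold Spec_solve; infer_instance

-- ===== CLAIM (what is proved, stated in full; the proofs are below) =====
def Claim_equal_solve : Prop :=
  ∀ (board : List (List Int)), Dom_solve board → Pre_solve board → Spec_solve board (solve board)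

-- ===== LEMMAS AND PROOFS =====

-- ---------- board primitives ----------
def RowLens (bd : List (List Int)) : List Nat := bd.map List.length

def Rect (c : Int) (bd : List (List Int)) : Prop := ∀ row ∈ bd, c ≤ (row.length : Int)

def Inb (r c : Int) (p : Int × Int) : Prop := 0 ≤ p.1 ∧ p.1 < r ∧ 0 ≤ p.2 ∧ p.2 < c

def LandP (c : Int) (bd : List (List Int)) (p : Int × Int) : Prop :=
  Inb (bd.length : Int) c p ∧ bget bd p.1 p.2 ≠ 0

def Adj (p q : Int × Int) : Prop :=
  (q.1 = p.1 + 1 ∧ q.2 = p.2) ∨ (q.1 = p.1 - 1 ∧ q.2 = p.2) ∨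
  (q.1 = p.1 ∧ q.2 = p.2 + 1) ∨ (q.1 = p.1 ∧ q.2 = p.2 - 1)

def StepP (c : Int) (bd : List (List Int)) (p q : Int × Int) : Prop :=
  LandP c bd p ∧ LandP c bd q ∧ Adj p q

def ConnP (c : Int) (bd : List (List Int)) : Int × Int → Int × Int → Prop :=
  Relation.ReflTransGen (StepP c bd)

def BorderP (r c : Int) (p : Int × Int) : Prop :=
  p.1 = 0 ∨ p.1 = r - 1 ∨ p.2 = 0 ∨ p.2 = c - 1

def GoodP (r c : Int) (bd : List (List Int)) (p : Int × Int) : Prop :=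
  ∃ q, BorderP r c q ∧ ConnP c bd p q

def SeedP (r c : Int) (bd : List (List Int)) (p : Int × Int) : Prop :=
  LandP c bd p ∧ BorderP r c p

def ReachP (r c : Int) (bd : List (List Int)) (p : Int × Int) : Prop :=
  ∃ s, SeedP r c bd s ∧ ConnP c bd s p

def EraseEq (bd : List (List Int)) (C : List (Int × Int)) (bd' : List (List Int)) : Prop :=
  RowLens bd' = RowLens bd ∧
  ∀ p : Int × Int, 0 ≤ p.1 → 0 ≤ p.2 →
    bget bd' p.1 p.2 = if p ∈ C then 0 else bget bd p.1 p.2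

def ClosedC (c : Int) (bd : List (List Int)) (C : List (Int × Int)) : Prop :=
  ∀ p ∈ C, ∀ q, StepP c bd p q → q ∈ C

def cellsL (r c : Int) : List (Int × Int) :=
  (PySem.List.pyRange 0 r 1).flatMap (fun i => (PySem.List.pyRange 0 c 1).map (fun j => (i, j)))

-- ---------- small board lemmas ----------
lemma rect_of_rowLens {c : Int} {bd bd' : List (List Int)}
    (h : RowLens bd' = RowLens bd) (hr : Rect c bd) : Rect c bd' := by
  intro row hrow
  have hm : row.length ∈ RowLens bd := by
    rw [← h]; exact List.mem_map_of_mem hrow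
  obtain ⟨row0, hrow0, hlen⟩ := List.mem_map.mp hm
  have := hr row0 hrow0
  omega

lemma bget_nonneg_eq {bd : List (List Int)} {i j : Int} (hi : 0 ≤ i) (hj : 0 ≤ j) :
    bget bd i j = ((bd.getD i.toNat []).getD j.toNat 0) := by
  unfold bget
  rw [PySem.List.pyGetD_of_nonneg _ _ hi, PySem.List.pyGetD_of_nonneg _ _ hj]

lemma bset_eq_set {bd : List (List Int)} {i j v : Int} (hi : 0 ≤ i) (hj : 0 ≤ j) :
    bset bd i j v = bd.set i.toNat ((bd.getD i.toNat []).set j.toNat v) := by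
  unfold bset
  rw [PySem.List.pyGetD_of_nonneg _ _ hi, PySem.List.pySetD_of_nonneg _ _ hj,
    PySem.List.pySetD_of_nonneg _ _ hi]

lemma rowLens_bset (bd : List (List Int)) (i j v : Int) (hi : 0 ≤ i) (hj : 0 ≤ j) :
    RowLens (bset bd i j v) = RowLens bd := by
  rw [bset_eq_set hi hj]
  unfold RowLens
  rw [List.map_set]
  apply List.ext_getElem
  · simp
  · intro n h1 h2
    simp only [List.getElem_set, List.length_set] at *
    split
    · rename_i hn; subst hn
      simp [List.getD_eq_getElem?_getD, List.getElem?_eq_getElem (by simpa using h2)]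
    · rfl

lemma bget_bset_same {bd : List (List Int)} {i j : Int} (v : Int)
    (hi0 : 0 ≤ i) (hi : i < (bd.length : Int)) (hj0 : 0 ≤ j)
    (hj : j < ((bd.getD i.toNat []).length : Int)) :
    bget (bset bd i j v) i j = v := by
  have hk : i.toNat < bd.length := by omega
  have hm : j.toNat < (bd.getD i.toNat []).length := by omega
  have hrow : bd.getD i.toNat [] = bd[i.toNat] := by
    simp [List.getD_eq_getElem?_getD, List.getElem?_eq_getElem hk]
  rw [hrow] at hm
  rw [bset_eq_set hi0 hj0, bget_nonneg_eq hi0 hj0]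
  simp [List.getD_eq_getElem?_getD, List.getElem?_set, hk,
    List.getElem?_eq_getElem hk, hm]

lemma bget_bset_ne {bd : List (List Int)} {i j i' j' : Int} (v : Int)
    (hi : 0 ≤ i) (hj : 0 ≤ j) (hi' : 0 ≤ i') (hj' : 0 ≤ j')
    (hne : (i', j') ≠ (i, j)) :
    bget (bset bd i j v) i' j' = bget bd i' j' := by
  rw [bset_eq_set hi hj, bget_nonneg_eq hi' hj', bget_nonneg_eq hi' hj']
  by_cases hii : i' = i
  · subst hii
    have hjj : j'.toNat ≠ j.toNat := by
      intro h
      exact hne (by simp only [Prod.mk.injEq]; exact ⟨trivial, by omega⟩)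
    by_cases hk : i'.toNat < bd.length
    · simp [List.getD_eq_getElem?_getD, List.getElem?_set, hk,
        List.getElem?_eq_getElem hk, hjj, Ne.symm hjj]
    · simp [List.getD_eq_getElem?_getD, List.getElem?_set, hk]
  · have hkk : i.toNat ≠ i'.toNat := by omega
    simp [List.getD_eq_getElem?_getD, List.getElem?_set, hkk]

lemma ext_of_bget {bd1 bd2 : List (List Int)}
    (hshape : RowLens bd1 = RowLens bd2)
    (hval : ∀ i j : Int, 0 ≤ i → 0 ≤ j → bget bd1 i j = bget bd2 i j) :
    bd1 = bd2 := by
  have hlen : bd1.length = bd2.length := by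
    have := congrArg List.length hshape
    simpa [RowLens] using this
  apply List.ext_getElem hlen
  intro k hk1 hk2
  have hrl : bd1[k].length = bd2[k].length := by
    have := congrArg (fun l => l[k]?) hshape
    simpa [RowLens, List.getElem?_map, List.getElem?_eq_getElem, hk1, hk2] using this
  apply List.ext_getElem hrl
  intro m hm1 hm2
  have := hval (k : Int) (m : Int) (by positivity) (by positivity)
  rw [bget_nonneg_eq (by positivity) (by positivity),
    bget_nonneg_eq (by positivity) (by positivity)] at this
  simpa [List.getD_eq_getElem?_getD, List.getElem?_eq_getElem, hk1, hk2, hm1, hm2] using this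

lemma countNZ_bset_zero {bd : List (List Int)} {i j : Int}
    (hi0 : 0 ≤ i) (hi : i < (bd.length : Int)) (hj0 : 0 ≤ j)
    (hj : j < ((bd.getD i.toNat []).length : Int)) (hnz : bget bd i j ≠ 0) :
    countNZ (bset bd i j 0) < countNZ bd := by
  have hk : i.toNat < bd.length := by omega
  have hm : j.toNat < (bd.getD i.toNat []).length := by omega
  have hrow : bd.getD i.toNat [] = bd[i.toNat] := by
    simp [List.getD_eq_getElem?_getD, List.getElem?_eq_getElem hk]
  rw [bget_nonneg_eq hi0 hj0, hrow] at hnz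
  rw [hrow] at hm
  have hm' : j.toNat < bd[i.toNat].length := by exact_mod_cast hm
  have hgd : bd[i.toNat].getD j.toNat 0 = bd[i.toNat][j.toNat] := by
    simp [List.getD_eq_getElem?_getD, List.getElem?_eq_getElem hm']
  rw [hgd] at hnz
  rw [bset_eq_set hi0 hj0, hrow]
  unfold countNZ
  rw [List.map_set]
  have hset : ∀ v : Int, (List.filter (fun v => !(v == 0)) (bd[i.toNat].set j.toNat v)).length
      = List.countP (fun v => !(v == 0)) (bd[i.toNat].set j.toNat v) := by
    intro v; rw [List.countP_eq_length_filter]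
  have hcnt : (List.filter (fun v => !(v == 0)) (bd[i.toNat].set j.toNat 0)).length
      < (List.filter (fun v => !(v == 0)) bd[i.toNat]).length := by
    rw [← List.countP_eq_length_filter, ← List.countP_eq_length_filter]
    rw [List.countP_set hm']
    have hp : (!(bd[i.toNat][j.toNat] == 0)) = true := by
      simpa using hnz
    have hpos : 0 < List.countP (fun v => !(v == 0)) bd[i.toNat] := by
      apply List.countP_pos_iff.mpr
      exact ⟨_, List.getElem_mem hm', hp⟩
    rw [if_pos hp, if_neg (by decide)]
    omega
  have hmap : i.toNat < (bd.map (fun row => (List.filter (fun v => !(v == 0)) row).length)).length := by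
    simpa using hk
  rw [List.sum_set]
  have hexp : (bd.map (fun row => (List.filter (fun v => !(v == 0)) row).length)).sum
      = ((bd.map (fun row => (List.filter (fun v => !(v == 0)) row).length)).take i.toNat).sum
        + (bd.map (fun row => (List.filter (fun v => !(v == 0)) row).length))[i.toNat]
        + ((bd.map (fun row => (List.filter (fun v => !(v == 0)) row).length)).drop (i.toNat+1)).sum := by
    conv_lhs => rw [← List.take_append_drop i.toNat (bd.map _)]
    rw [List.sum_append]
    rw [List.drop_eq_getElem_cons hmap]
    simp [add_assoc]
  rw [hexp]
  have hval : (bd.map (fun row => (List.filter (fun v => !(v == 0)) row).length))[i.toNat]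
      = (List.filter (fun v => !(v == 0)) bd[i.toNat]).length := by
    simp
  rw [hval]
  simp only [hmap, if_pos]
  omega

-- ---------- graph lemmas ----------
lemma adj_symm {p q : Int × Int} (h : Adj p q) : Adj q p := by
  unfold Adj at h ⊢; omega

lemma adj_enum {x p : Int × Int} :
    Adj x p ↔ p ∈ [(x.1 + 1, x.2), (x.1 - 1, x.2), (x.1, x.2 + 1), (x.1, x.2 - 1)] := by
  constructor
  · intro h
    rcases h with ⟨h1, h2⟩ | ⟨h1, h2⟩ | ⟨h1, h2⟩ | ⟨h1, h2⟩ <;>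
      simp [Prod.ext_iff, h1, h2]
  · intro h
    rcases List.mem_cons.mp h with rfl | h <;>
      [skip; rcases List.mem_cons.mp h with rfl | h] <;>
      [unfold Adj; unfold Adj; rcases List.mem_cons.mp h with rfl | h] <;>
      [omega; omega; unfold Adj; rcases List.mem_cons.mp h with rfl | h] <;>
      [omega; unfold Adj; simp at h] <;> omega

lemma step_symm {c : Int} {bd : List (List Int)} {p q : Int × Int}
    (h : StepP c bd p q) : StepP c bd q p :=
  ⟨h.2.1, h.1, adj_symm h.2.2⟩

lemma conn_symm {c : Int} {bd : List (List Int)} {p q : Int × Int}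
    (h : ConnP c bd p q) : ConnP c bd q p :=
  Relation.ReflTransGen.symmetric (fun _ _ hs => step_symm hs) h

lemma land_of_conn {c : Int} {bd : List (List Int)} {p q : Int × Int}
    (h : ConnP c bd p q) (hp : LandP c bd p) : LandP c bd q := by
  induction h with
  | refl => exact hp
  | tail _ hstep _ => exact hstep.2.1

lemma land_eraseEq {c : Int} {bd bd' : List (List Int)} {C : List (Int × Int)}
    (h : EraseEq bd C bd') (p : Int × Int) :
    LandP c bd' p ↔ LandP c bd p ∧ p ∉ C := by
  have hlen : bd'.length = bd.length := by
    have := congrArg List.length h.1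
    simpa [RowLens] using this
  constructor
  · rintro ⟨hinb, hnz⟩
    have hv := h.2 p hinb.1 hinb.2.2.1
    rw [hv] at hnz
    by_cases hc : p ∈ C
    · simp [hc] at hnz
    · rw [if_neg hc] at hnz
      refine ⟨⟨⟨hinb.1, by rw [← hlen]; exact hinb.2.1, hinb.2.2⟩, hnz⟩, hc⟩
  · rintro ⟨⟨hinb, hnz⟩, hc⟩
    have hv := h.2 p hinb.1 hinb.2.2.1
    rw [if_neg hc] at hv
    exact ⟨⟨hinb.1, by rw [hlen]; exact hinb.2.1, hinb.2.2⟩, by rw [hv]; exact hnz⟩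

lemma eraseEq_refl (bd : List (List Int)) : EraseEq bd [] bd :=
  ⟨rfl, by intro p _ _; simp⟩

lemma eraseEq_trans {bd bd' bd'' : List (List Int)} {C D : List (Int × Int)}
    (h1 : EraseEq bd C bd') (h2 : EraseEq bd' D bd'') : EraseEq bd (C ++ D) bd'' := by
  refine ⟨h2.1.trans h1.1, ?_⟩
  intro p h0 h0'
  rw [h2.2 p h0 h0']
  by_cases hD : p ∈ D
  · simp [hD, List.mem_append]
  · rw [if_neg hD, h1.2 p h0 h0']
    by_cases hC : p ∈ C
    · simp [hC, List.mem_append]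
    · simp [hC, hD, List.mem_append]

lemma eraseEq_of_mem_iff {bd bd' : List (List Int)} {C C' : List (Int × Int)}
    (h : ∀ p, p ∈ C ↔ p ∈ C') (hE : EraseEq bd C bd') : EraseEq bd C' bd' := by
  refine ⟨hE.1, ?_⟩
  intro p h0 h0'
  rw [hE.2 p h0 h0']
  by_cases hp : p ∈ C
  · rw [if_pos hp, if_pos ((h p).mp hp)]
  · rw [if_neg hp, if_neg (fun hq => hp ((h p).mpr hq))]

lemma conn_in_closed {c : Int} {bd : List (List Int)} {C : List (Int × Int)} {p q : Int × Int}
    (hC : ClosedC c bd C) (hp : p ∈ C) (h : ConnP c bd p q) : q ∈ C := by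
  induction h with
  | refl => exact hp
  | tail _ hstep ih => exact hC _ ih _ hstep

lemma closed_of_char {c : Int} {bd : List (List Int)} {C : List (Int × Int)}
    {P : Int × Int → Prop}
    (hchar : ∀ q, q ∈ C ↔ P q)
    (hcl : ∀ p q, P p → StepP c bd p q → P q) : ClosedC c bd C := by
  intro p hp q hstep
  exact (hchar q).mpr (hcl p q ((hchar p).mp hp) hstep)

lemma conn_mono_erase {c : Int} {bd bd' : List (List Int)} {C : List (Int × Int)}
    {a b : Int × Int} (hE : EraseEq bd C bd') (h : ConnP c bd' a b) : ConnP c bd a b := by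
  induction h with
  | refl => exact .refl
  | tail _ hstep ih =>
    exact ih.tail ⟨((land_eraseEq hE _).mp hstep.1).1,
      ((land_eraseEq hE _).mp hstep.2.1).1, hstep.2.2⟩

-- L3: erasing a Conn-closed set does not change connectivity of live cells
lemma conn_erase_iff {c : Int} {bd bd' : List (List Int)} {C : List (Int × Int)}
    {z q : Int × Int}
    (hE : EraseEq bd C bd') (hcl : ClosedC c bd C) (hz : z ∉ C) :
    (ConnP c bd' z q ↔ ConnP c bd z q) := by
  constructor
  · exact conn_mono_erase hE
  · intro h
    suffices hs : ConnP c bd' z q ∧ q ∉ C by exact hs.1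
    induction h with
    | refl => exact ⟨.refl, hz⟩
    | tail _ hstep ih =>
      rename_i b q hbq
      have hqC : q ∉ C := by
        intro hqC
        exact ih.2 (hcl _ hqC _ (step_symm hstep))
      refine ⟨ih.1.tail ⟨(land_eraseEq hE _).mpr ⟨hstep.1, ih.2⟩,
        (land_eraseEq hE _).mpr ⟨hstep.2.1, hqC⟩, hstep.2.2⟩, hqC⟩

-- L2: first-step decomposition of a component
lemma conn_head_decomp {c : Int} {bd bd1 : List (List Int)} {x q : Int × Int}
    (hx : LandP c bd x) (hE : EraseEq bd [x] bd1) :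
    ConnP c bd x q ↔ q = x ∨ ∃ p, Adj x p ∧ LandP c bd1 p ∧ ConnP c bd1 p q := by
  constructor
  · intro h
    induction h with
    | refl => exact Or.inl rfl
    | tail _ hstep ih =>
      rename_i b q hxb
      by_cases hqx : q = x
      · exact Or.inl hqx
      · rcases ih with hbx | ⟨p, hadj, hlp, hconn⟩
        · subst hbx
          exact Or.inr ⟨q, hstep.2.2,
            (land_eraseEq hE _).mpr ⟨hstep.2.1, by simp [hqx]⟩, .refl⟩
        · have hbx : b ≠ x := by
            intro hb; subst hb
            exact (((land_eraseEq hE _).mp (land_of_conn hconn hlp)).2) (by simp)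
          refine Or.inr ⟨p, hadj, hlp, hconn.tail
            ⟨(land_eraseEq hE _).mpr ⟨hstep.1, by simp [hbx]⟩,
             (land_eraseEq hE _).mpr ⟨hstep.2.1, by simp [hqx]⟩, hstep.2.2⟩⟩
  · rintro (rfl | ⟨p, hadj, hlp, hconn⟩)
    · exact .refl
    · have hp : LandP c bd p := ((land_eraseEq hE _).mp hlp).1
      exact (Relation.ReflTransGen.single ⟨hx, hp, hadj⟩).trans (conn_mono_erase hE hconn)

-- sequential-exploration composition step
lemma comp_step {c : Int} {bd bdk bd' : List (List Int)}
    {D C ms : List (Int × Int)} {n : Int × Int}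
    (hD : ∀ q, q ∈ D ↔ ∃ m ∈ ms, LandP c bd m ∧ ConnP c bd m q)
    (hE : EraseEq bd D bdk)
    (hC : ∀ q, q ∈ C ↔ LandP c bdk n ∧ ConnP c bdk n q)
    (hE' : EraseEq bdk C bd') (hDnd : D.Nodup) (hCnd : C.Nodup) :
    (∀ q, q ∈ D ++ C ↔ ∃ m ∈ ms ++ [n], LandP c bd m ∧ ConnP c bd m q) ∧
      EraseEq bd (D ++ C) bd' ∧ (D ++ C).Nodup := by
  have hDcl : ClosedC c bd D := by
    apply closed_of_char hD
    rintro p q ⟨m, hm, hlm, hconn⟩ hstep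
    exact ⟨m, hm, hlm, hconn.tail hstep⟩
  have hCD : ∀ q ∈ C, q ∉ D := by
    intro q hq
    have h1 := (hC q).mp hq
    exact ((land_eraseEq hE _).mp (land_of_conn h1.2 h1.1)).2
  refine ⟨?_, eraseEq_trans hE hE', ?_⟩
  · intro q
    simp only [List.mem_append, List.mem_singleton]
    constructor
    · rintro (hq | hq)
      · obtain ⟨m, hm, hlm, hconn⟩ := (hD q).mp hq
        exact ⟨m, Or.inl hm, hlm, hconn⟩
      · obtain ⟨hln, hconn⟩ := (hC q).mp hq
        have hnD := ((land_eraseEq hE _).mp hln).2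
        exact ⟨n, Or.inr rfl, ((land_eraseEq hE _).mp hln).1,
          (conn_erase_iff hE hDcl hnD).mp hconn⟩
    · rintro ⟨m, hm | rfl, hlm, hconn⟩
      · exact Or.inl ((hD q).mpr ⟨m, hm, hlm, hconn⟩)
      · by_cases hmD : m ∈ D
        · exact Or.inl (conn_in_closed hDcl hmD hconn)
        · exact Or.inr ((hC q).mpr ⟨(land_eraseEq hE _).mpr ⟨hlm, hmD⟩,
            (conn_erase_iff hE hDcl hmD).mpr hconn⟩)
  · rw [List.nodup_append]
    refine ⟨hDnd, hCnd, fun a ha b hb heq => ?_⟩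
    subst heq
    exact hCD a hb ha

-- ---------- dfsA specification ----------
lemma flag_helper {r c : Int} (d : Prop) [Decidable d] (x : Int × Int)
    (hd : d ↔ BorderP r c x) (a1 a2 a3 a4 : Bool) (l1 l2 l3 l4 : List (Int × Int))
    (h1 : a1 = true ↔ ∃ q ∈ l1, BorderP r c q)
    (h2 : a2 = true ↔ ∃ q ∈ l2, BorderP r c q)
    (h3 : a3 = true ↔ ∃ q ∈ l3, BorderP r c q)
    (h4 : a4 = true ↔ ∃ q ∈ l4, BorderP r c q) :
    (decide d || a1 || a2 || a3 || a4) = true ↔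
      ∃ q ∈ x :: (l1 ++ l2 ++ l3 ++ l4), BorderP r c q := by
  simp only [Bool.or_eq_true, decide_eq_true_eq, h1, h2, h3, h4, hd,
    List.mem_cons, List.mem_append]
  constructor
  · rintro ((((hb | ⟨q, hq, hb⟩) | ⟨q, hq, hb⟩) | ⟨q, hq, hb⟩) | ⟨q, hq, hb⟩)
    · exact ⟨x, Or.inl rfl, hb⟩
    · exact ⟨q, Or.inr (Or.inl (Or.inl (Or.inl hq))), hb⟩
    · exact ⟨q, Or.inr (Or.inl (Or.inl (Or.inr hq))), hb⟩
    · exact ⟨q, Or.inr (Or.inl (Or.inr hq)), hb⟩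
    · exact ⟨q, Or.inr (Or.inr hq), hb⟩
  · rintro ⟨q, rfl | (((hq | hq) | hq) | hq), hb⟩
    · exact Or.inl (Or.inl (Or.inl (Or.inl hb)))
    · exact Or.inl (Or.inl (Or.inl (Or.inr ⟨q, hq, hb⟩)))
    · exact Or.inl (Or.inl (Or.inr ⟨q, hq, hb⟩))
    · exact Or.inl (Or.inr ⟨q, hq, hb⟩)
    · exact Or.inr ⟨q, hq, hb⟩

set_option maxRecDepth 8192 in
lemma dfsA_spec {r c : Int} : ∀ (fuel : Nat) (bd : List (List Int)) (i j : Int),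
    Rect c bd → (bd.length : Int) = r → countNZ bd < fuel →
    (∀ q, q ∈ (dfsA fuel r c bd i j).2.1 ↔ LandP c bd (i, j) ∧ ConnP c bd (i, j) q) ∧
    EraseEq bd (dfsA fuel r c bd i j).2.1 (dfsA fuel r c bd i j).1 ∧
    (dfsA fuel r c bd i j).2.1.Nodup ∧
    countNZ (dfsA fuel r c bd i j).1 ≤ countNZ bd ∧
    ((dfsA fuel r c bd i j).2.2 = true ↔ ∃ q ∈ (dfsA fuel r c bd i j).2.1, BorderP r c q) := by
  intro fuel
  induction fuel with
  | zero => intro bd i j _ _ hfuel; omega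
  | succ f ih =>
    intro bd i j hrect hr hfuel
    by_cases hg : i < 0 ∨ r ≤ i ∨ j < 0 ∨ c ≤ j
    · have hnl : ¬ LandP c bd (i, j) := by
        rintro ⟨⟨h1, h2, h3, h4⟩, _⟩
        dsimp only at h1 h2 h3 h4
        omega
      rw [show dfsA (f + 1) r c bd i j = (bd, [], false) by
        simp only [dfsA]; rw [if_pos hg]]
      exact ⟨fun q => by simp [hnl], eraseEq_refl bd, List.nodup_nil, le_refl _, by simp⟩
    · by_cases hz : bget bd i j = 0
      · have hnl : ¬ LandP c bd (i, j) := fun h => h.2 hz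
        rw [show dfsA (f + 1) r c bd i j = (bd, [], false) by
          simp only [dfsA]; rw [if_neg hg, if_pos hz]]
        exact ⟨fun q => by simp [hnl], eraseEq_refl bd, List.nodup_nil, le_refl _, by simp⟩
      · push_neg at hg
        obtain ⟨hi0, hi1, hj0, hj1⟩ := hg
        have hland : LandP c bd (i, j) := ⟨⟨hi0, by rw [hr]; exact hi1, hj0, hj1⟩, hz⟩
        have hkk : i.toNat < bd.length := by omega
        have hrowmem : bd.getD i.toNat [] ∈ bd := by
          rw [List.getD_eq_getElem?_getD, List.getElem?_eq_getElem hkk]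
          exact List.getElem_mem hkk
        have hrl : j < ((bd.getD i.toNat []).length : Int) :=
          lt_of_lt_of_le hj1 (hrect _ hrowmem)
        have hE1 : EraseEq bd [(i, j)] (bset bd i j 0) := by
          refine ⟨rowLens_bset bd i j 0 hi0 hj0, ?_⟩
          intro p h0 h0'
          by_cases hp : p ∈ [(i, j)]
          · rw [if_pos hp]
            have hpe : p = (i, j) := by simpa using hp
            subst hpe
            exact bget_bset_same 0 hi0 (by omega) hj0 hrl
          · rw [if_neg hp]
            exact bget_bset_ne 0 hi0 hj0 h0 h0' (by simpa using hp)
        have hrect1 := rect_of_rowLens hE1.1 hrect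
        have hlen1 : (bset bd i j 0).length = bd.length := by
          have := congrArg List.length hE1.1
          simpa [RowLens] using this
        have hr1 : ((bset bd i j 0).length : Int) = r := by rw [hlen1]; exact hr
        have hcnt1 : countNZ (bset bd i j 0) < countNZ bd :=
          countNZ_bset_zero hi0 (by omega) hj0 hrl hz
        obtain ⟨hC1, hEE1, hnd1, hct1, hf1⟩ :=
          ih (bset bd i j 0) (i + 1) j hrect1 hr1 (by omega)
        have hrect2 := rect_of_rowLens hEE1.1 hrect1
        have hlen2 : (dfsA f r c (bset bd i j 0) (i + 1) j).1.length = (bset bd i j 0).length := by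
          have := congrArg List.length hEE1.1
          simpa [RowLens] using this
        obtain ⟨hC2, hEE2, hnd2, hct2, hf2⟩ :=
          ih (dfsA f r c (bset bd i j 0) (i + 1) j).1 (i - 1) j hrect2 (by rw [hlen2]; exact hr1) (by omega)
        have hrect3 := rect_of_rowLens hEE2.1 hrect2
        have hlen3 : (dfsA f r c (dfsA f r c (bset bd i j 0) (i + 1) j).1 (i - 1) j).1.length = (dfsA f r c (bset bd i j 0) (i + 1) j).1.length := by
          have := congrArg List.length hEE2.1
          simpa [RowLens] using this
        obtain ⟨hC3, hEE3, hnd3, hct3, hf3⟩ :=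
          ih (dfsA f r c (dfsA f r c (bset bd i j 0) (i + 1) j).1 (i - 1) j).1 i (j + 1) hrect3 (by rw [hlen3, hlen2]; exact hr1) (by omega)
        have hrect4 := rect_of_rowLens hEE3.1 hrect3
        have hlen4 : (dfsA f r c (dfsA f r c (dfsA f r c (bset bd i j 0) (i + 1) j).1 (i - 1) j).1 i (j + 1)).1.length = (dfsA f r c (dfsA f r c (bset bd i j 0) (i + 1) j).1 (i - 1) j).1.length := by
          have := congrArg List.length hEE3.1
          simpa [RowLens] using this
        obtain ⟨hC4, hEE4, hnd4, hct4, hf4⟩ :=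
          ih (dfsA f r c (dfsA f r c (dfsA f r c (bset bd i j 0) (i + 1) j).1 (i - 1) j).1 i (j + 1)).1 i (j - 1) hrect4 (by rw [hlen4, hlen3, hlen2]; exact hr1) (by omega)
        obtain ⟨hD1, hEB1, hndD1⟩ :=
          comp_step (bd := bset bd i j 0) (ms := []) (by simp) (eraseEq_refl _)
            hC1 hEE1 List.nodup_nil hnd1
        obtain ⟨hD2, hEB2, hndD2⟩ := comp_step hD1 hEB1 hC2 hEE2 hndD1 hnd2
        obtain ⟨hD3, hEB3, hndD3⟩ := comp_step hD2 hEB2 hC3 hEE3 hndD2 hnd3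
        obtain ⟨hD4, hEB4, hndD4⟩ := comp_step hD3 hEB3 hC4 hEE4 hndD3 hnd4
        have hstep : dfsA (f + 1) r c bd i j =
            ((dfsA f r c (dfsA f r c (dfsA f r c (dfsA f r c (bset bd i j 0) (i + 1) j).1 (i - 1) j).1 i (j + 1)).1 i (j - 1)).1,
             (i, j) :: ((dfsA f r c (bset bd i j 0) (i + 1) j).2.1 ++ (dfsA f r c (dfsA f r c (bset bd i j 0) (i + 1) j).1 (i - 1) j).2.1 ++ (dfsA f r c (dfsA f r c (dfsA f r c (bset bd i j 0) (i + 1) j).1 (i - 1) j).1 i (j + 1)).2.1 ++ (dfsA f r c (dfsA f r c (dfsA f r c (dfsA f r c (bset bd i j 0) (i + 1) j).1 (i - 1) j).1 i (j + 1)).1 i (j - 1)).2.1),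
             (decide (i - 1 < 0 ∨ i + 1 > r - 1 ∨ j - 1 < 0 ∨ j + 1 > c - 1)
               || (dfsA f r c (bset bd i j 0) (i + 1) j).2.2 || (dfsA f r c (dfsA f r c (bset bd i j 0) (i + 1) j).1 (i - 1) j).2.2 || (dfsA f r c (dfsA f r c (dfsA f r c (bset bd i j 0) (i + 1) j).1 (i - 1) j).1 i (j + 1)).2.2 || (dfsA f r c (dfsA f r c (dfsA f r c (dfsA f r c (bset bd i j 0) (i + 1) j).1 (i - 1) j).1 i (j + 1)).1 i (j - 1)).2.2)) := by
          simp only [dfsA]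
          rw [if_neg (by omega), if_neg hz]
        rw [hstep]
        have hbig : ∀ q : Int × Int,
            q ∈ (dfsA f r c (bset bd i j 0) (i + 1) j).2.1 ++ (dfsA f r c (dfsA f r c (bset bd i j 0) (i + 1) j).1 (i - 1) j).2.1 ++ (dfsA f r c (dfsA f r c (dfsA f r c (bset bd i j 0) (i + 1) j).1 (i - 1) j).1 i (j + 1)).2.1 ++ (dfsA f r c (dfsA f r c (dfsA f r c (dfsA f r c (bset bd i j 0) (i + 1) j).1 (i - 1) j).1 i (j + 1)).1 i (j - 1)).2.1 ↔
            ∃ p, Adj (i, j) p ∧ LandP c (bset bd i j 0) p ∧ ConnP c (bset bd i j 0) p q := by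
          intro q
          have h4 := hD4 q
          simp only [List.nil_append, List.append_assoc, List.mem_append,
            List.mem_singleton, List.mem_cons, List.not_mem_nil, or_false] at h4 ⊢
          rw [h4]
          constructor
          · rintro ⟨m, hm, hlm, hconn⟩
            refine ⟨m, ?_, hlm, hconn⟩
            rw [adj_enum]
            dsimp only
            rcases hm with rfl | rfl | rfl | rfl <;> simp
          · rintro ⟨p, hadj, hlp, hconn⟩
            refine ⟨p, ?_, hlp, hconn⟩
            rw [adj_enum] at hadj
            dsimp only at hadj
            simpa using hadj
        refine ⟨?_, ?_, ?_, ?_, ?_⟩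
        · intro q
          dsimp only
          rw [List.mem_cons, hbig q, conn_head_decomp hland hE1]
          constructor
          · rintro (rfl | h)
            · exact ⟨hland, Or.inl rfl⟩
            · exact ⟨hland, Or.inr h⟩
          · rintro ⟨_, h⟩
            exact h.imp id id
        · dsimp only
          refine eraseEq_of_mem_iff ?_ (eraseEq_trans hE1 hEB4)
          intro p
          simp only [List.mem_append, List.mem_cons, List.not_mem_nil, or_false, false_or]
        · dsimp only
          rw [List.nodup_cons]
          constructor
          · intro hmem
            have := (hbig _).mp hmem
            obtain ⟨p, _, hlp, hconn⟩ := this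
            have hlq := land_of_conn hconn hlp
            exact ((land_eraseEq hE1 _).mp hlq).2 (by simp)
          · have := hndD4
            simpa [List.append_assoc] using this
        · dsimp only
          omega
        · dsimp only
          have hbord : (i - 1 < 0 ∨ i + 1 > r - 1 ∨ j - 1 < 0 ∨ j + 1 > c - 1) ↔
              BorderP r c (i, j) := by
            unfold BorderP
            dsimp only
            omega
          exact flag_helper _ _ hbord _ _ _ _ _ _ _ _ hf1 hf2 hf3 hf4

-- ---------- generic loop shapes ----------
lemma foldl_nested {α β γ : Type} (L1 : List α) (L2 : List β) (g : γ → α × β → γ)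
    (init : γ) :
    L1.foldl (fun st i => L2.foldl (fun st j => g st (i, j)) st) init
      = (L1.flatMap (fun i => L2.map (fun j => (i, j)))).foldl g init := by
  induction L1 generalizing init with
  | nil => simp
  | cons x L ih =>
    simp only [List.foldl_cons, List.flatMap_cons, List.foldl_append, List.foldl_map]
    exact ih _

lemma mem_cellsL {r c : Int} {p : Int × Int} : p ∈ cellsL r c ↔ Inb r c p := by
  unfold cellsL Inb
  simp only [List.mem_flatMap, List.mem_map, PySem.List.mem_pyRange_one]
  constructor
  · rintro ⟨i, hi, j, hj, rfl⟩
    exact ⟨hi.1, hi.2, hj.1, hj.2⟩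
  · rintro ⟨h1, h2, h3, h4⟩
    exact ⟨p.1, ⟨h1, h2⟩, p.2, ⟨h3, h4⟩, rfl⟩

lemma nodup_cellsL {r c : Int} : (cellsL r c).Nodup := by
  unfold cellsL
  rw [List.nodup_flatMap]
  refine ⟨fun i _ => ?_, ?_⟩
  · exact (PySem.List.nodup_pyRange_one _ _).map (fun a b h => by simpa using h)
  · refine List.Pairwise.imp ?_ (PySem.List.pairwise_lt_pyRange_one 0 r)
    intro a b hab
    intro q hqa hqb
    obtain ⟨j1, _, rfl⟩ := List.mem_map.mp hqa
    obtain ⟨j2, _, h2⟩ := List.mem_map.mp hqb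
    have hfst : b = a := by
      have := congrArg Prod.fst h2
      simpa using this
    omega

lemma length_cellsL {r c : Int} (hr : 0 ≤ r) (hc : 0 ≤ c) :
    (cellsL r c).length = r.toNat * c.toNat := by
  unfold cellsL
  rw [List.length_flatMap]
  have hm : (List.map (fun a => ((PySem.List.pyRange 0 c 1).map (fun j => (a, j))).length)
      (PySem.List.pyRange 0 r 1)) = List.replicate (r.toNat) (c.toNat) := by
    rw [List.eq_replicate_iff]
    constructor
    · simp [PySem.List.length_pyRange_one]
    · intro b hb
      obtain ⟨a, _, rfl⟩ := List.mem_map.mp hb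
      simp [PySem.List.length_pyRange_one]
  rw [hm, List.sum_replicate, smul_eq_mul]

lemma filter_length_drop_one {α : Type} [DecidableEq α] {L : List α} {x : α}
    (hnd : L.Nodup) (hx : x ∈ L) (p p' : α → Bool)
    (hpx : p x = true) (hp'x : p' x = false) (hagree : ∀ y, y ≠ x → p' y = p y) :
    (L.filter p').length + 1 = (L.filter p).length := by
  induction L with
  | nil => simp at hx
  | cons a L ih =>
    rcases List.mem_cons.mp hx with heq | haL
    · subst heq
      have hnotL : x ∉ L := (List.nodup_cons.mp hnd).1
      have hfilt : L.filter p' = L.filter p := by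
        apply List.filter_congr
        intro y hy
        exact hagree y (fun h => hnotL (h ▸ hy))
      simp [List.filter_cons, hpx, hp'x, hfilt]
    · by_cases hax : a = x
      · subst hax
        exact absurd haL (List.nodup_cons.mp hnd).1
      · have hpa : p' a = p a := hagree a hax
        have := ih (List.nodup_cons.mp hnd).2 haL
        simp only [List.filter_cons, hpa]
        by_cases hpa' : p a = true
        · simp [hpa']
          omega
        · simp [hpa']
          omega

-- ---------- B-side: flood fill ----------
lemma good_iff_reach {r c : Int} {bd : List (List Int)} {p : Int × Int}
    (hr : r = (bd.length : Int)) (hp : LandP c bd p) :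
    GoodP r c bd p ↔ ReachP r c bd p := by
  constructor
  · rintro ⟨q, hb, hconn⟩
    rcases (Relation.reflTransGen_iff_eq_or_transGen.mp hconn) with rfl | htg
    · exact ⟨q, ⟨hp, hb⟩, .refl⟩
    · have hlq : LandP c bd q := land_of_conn hconn hp
      exact ⟨q, ⟨hlq, hb⟩, conn_symm hconn⟩
  · rintro ⟨s, ⟨hls, hbs⟩, hconn⟩
    exact ⟨s, hbs, conn_symm hconn⟩

lemma reach_closed_subset {r c : Int} {bd : List (List Int)} {S : List (Int × Int)}
    (hseed : ∀ s, SeedP r c bd s → s ∈ S)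
    (hcl : ∀ p ∈ S, ∀ q, StepP c bd p q → q ∈ S) :
    ∀ p, ReachP r c bd p → p ∈ S := by
  rintro p ⟨s, hs, hconn⟩
  induction hconn with
  | refl => exact hseed _ hs
  | tail _ hstep ih => exact hcl _ ih _ hstep

lemma flood_spec {r c : Int} {bd : List (List Int)} (hr : r = (bd.length : Int)) :
    ∀ (fuel : Nat) (stack : List (Int × Int)) (safe : PySem.Set (Int × Int)),
    stack.length + 5 * ((cellsL r c).filter (fun p => !(decide (p ∈ safe)))).length < fuel →
    (∀ p ∈ stack, LandP c bd p ∧ ReachP r c bd p) →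
    (∀ p ∈ safe, ReachP r c bd p) →
    (∀ s, SeedP r c bd s → s ∈ safe ∨ s ∈ stack) →
    (∀ p ∈ safe, ∀ q, StepP c bd p q → q ∈ safe ∨ q ∈ stack) →
    ∀ p, p ∈ floodB fuel bd r c stack safe ↔ ReachP r c bd p := by
  intro fuel
  induction fuel with
  | zero =>
    intro stack safe hfuel hstk hsafe hseed hcl p
    omega
  | succ f ihf =>
    intro stack safe hfuel hstk hsafe hseed hcl p
    rcases List.eq_nil_or_concat stack with rfl | ⟨st', x, rfl⟩
    · rw [show floodB (f + 1) bd r c [] safe = safe by simp [floodB]]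
      constructor
      · exact fun hp => hsafe p hp
      · refine fun hp => reach_closed_subset (S := safe) ?_ ?_ p hp
        · intro s hs
          rcases hseed s hs with h | h
          · exact h
          · simp at h
        · intro a ha q hq
          rcases hcl a ha q hq with h | h
          · exact h
          · simp at h
    · simp only [List.concat_eq_append] at *
      have hx_in : x ∈ st' ++ [x] := List.mem_append_right _ (List.mem_singleton.mpr rfl)
      have hunf : floodB (f + 1) bd r c (st' ++ [x]) safe =
          (if x ∈ safe then floodB f bd r c st' safe
           else
             floodB f bd r c
               (st' ++ [(x.1 + 1, x.2), (x.1 - 1, x.2), (x.1, x.2 + 1), (x.1, x.2 - 1)].filter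
                 (fun q => decide (0 ≤ q.1 ∧ q.1 < r ∧ 0 ≤ q.2 ∧ q.2 < c) &&
                   !(bget bd q.1 q.2 == 0) && !(decide (q ∈ PySem.Set.add safe x))))
               (PySem.Set.add safe x)) := by
        simp only [floodB, List.getLast?_concat, List.dropLast_concat]
      rw [hunf]
      by_cases hx : x ∈ safe
      · rw [if_pos hx]
        refine ihf st' safe (by simp at hfuel; omega) ?_ hsafe ?_ ?_ p
        · exact fun q hq => hstk q (List.mem_append_left _ hq)
        · intro s hs
          rcases hseed s hs with h | h
          · exact Or.inl h
          · rcases List.mem_append.mp h with h | h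
            · exact Or.inr h
            · exact Or.inl (by rwa [List.mem_singleton.mp h])
        · intro a ha q hq
          rcases hcl a ha q hq with h | h
          · exact Or.inl h
          · rcases List.mem_append.mp h with h | h
            · exact Or.inr h
            · exact Or.inl (by rwa [List.mem_singleton.mp h])
      · rw [if_neg hx]
        rw [PySem.Set.add_of_not_mem hx]
        have hxl : LandP c bd x := (hstk x hx_in).1
        have hxr : ReachP r c bd x := (hstk x hx_in).2
        have hxcell : x ∈ cellsL r c := by
          rw [mem_cellsL]
          have := hxl.1
          exact ⟨this.1, by rw [hr]; exact this.2.1, this.2.2⟩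
        have hU : ((cellsL r c).filter (fun p => !(decide (p ∈ safe ++ [x])))).length + 1
            = ((cellsL r c).filter (fun p => !(decide (p ∈ safe)))).length := by
          apply filter_length_drop_one nodup_cellsL hxcell
          · simp [hx]
          · simp
          · intro y hy
            simp [List.mem_append, hy]
        have hnb : ([(x.1 + 1, x.2), (x.1 - 1, x.2), (x.1, x.2 + 1), (x.1, x.2 - 1)].filter
            (fun q => decide (0 ≤ q.1 ∧ q.1 < r ∧ 0 ≤ q.2 ∧ q.2 < c) &&
              !(bget bd q.1 q.2 == 0) && !(decide (q ∈ safe ++ [x])))).length ≤ 4 :=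
          List.length_filter_le _ _
        refine ihf _ (safe ++ [x]) ?_ ?_ ?_ ?_ ?_ p
        · rw [List.length_append]
          simp only [List.length_append, List.length_cons, List.length_nil] at hfuel
          omega
        · intro q hq
          rcases List.mem_append.mp hq with hq | hq
          · exact hstk q (List.mem_append_left _ hq)
          · obtain ⟨hq4, hcond⟩ := List.mem_filter.mp hq
            simp only [Bool.and_eq_true, decide_eq_true_eq, Bool.not_eq_true',
              beq_eq_false_iff_ne, ne_eq, decide_eq_false_iff_not] at hcond
            have hlq : LandP c bd q :=
              ⟨⟨hcond.1.1.1, by rw [← hr]; exact hcond.1.1.2.1, hcond.1.1.2.2⟩, hcond.1.2⟩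
            have hadj : Adj x q := by rw [adj_enum]; exact hq4
            exact ⟨hlq, hxr.imp (fun s hs => ⟨hs.1, hs.2.tail ⟨hxl, hlq, hadj⟩⟩)⟩
        · intro q hq
          rcases List.mem_append.mp hq with hq | hq
          · exact hsafe q hq
          · rw [List.mem_singleton.mp hq]; exact hxr
        · intro s hs
          rcases hseed s hs with h | h
          · exact Or.inl (List.mem_append_left _ h)
          · rcases List.mem_append.mp h with h | h
            · exact Or.inr (List.mem_append_left _ h)
            · exact Or.inl (List.mem_append_right _ h)
        · intro a ha q hq
          rcases List.mem_append.mp ha with ha | ha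
          · rcases hcl a ha q hq with h | h
            · exact Or.inl (List.mem_append_left _ h)
            · rcases List.mem_append.mp h with h | h
              · exact Or.inr (List.mem_append_left _ h)
              · exact Or.inl (List.mem_append_right _ h)
          · rw [List.mem_singleton.mp ha] at hq
            by_cases hqs : q ∈ safe ++ [x]
            · exact Or.inl hqs
            · refine Or.inr (List.mem_append_right _ (List.mem_filter.mpr ⟨?_, ?_⟩))
              · rw [← adj_enum]; exact hq.2.2
              · have hlq := hq.2.1
                simp only [Bool.and_eq_true, decide_eq_true_eq, Bool.not_eq_true',
                  beq_eq_false_iff_ne, ne_eq, decide_eq_false_iff_not]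
                exact ⟨⟨⟨hlq.1.1, by rw [hr]; exact hlq.1.2.1, hlq.1.2.2⟩,
                  hlq.2⟩, hqs⟩

-- ---------- write-back and loop lemmas ----------
lemma getD_length_eq_of_rowLens {bd1 bd2 : List (List Int)}
    (h : RowLens bd1 = RowLens bd2) (k : Nat) :
    (bd1.getD k []).length = (bd2.getD k []).length := by
  have hl : bd1.length = bd2.length := by
    have := congrArg List.length h
    simpa [RowLens] using this
  by_cases hk : k < bd1.length
  · have hk2 : k < bd2.length := by omega
    have := congrArg (fun l => l[k]?) h
    simp only [RowLens, List.getElem?_map, List.getElem?_eq_getElem hk,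
      List.getElem?_eq_getElem hk2, Option.map_some] at this
    simp [List.getD_eq_getElem?_getD, List.getElem?_eq_getElem hk,
      List.getElem?_eq_getElem hk2]
    exact Option.some.inj this
  · have hk2 : ¬ k < bd2.length := by omega
    have e1 : bd1[k]? = none := List.getElem?_eq_none (by omega)
    have e2 : bd2[k]? = none := List.getElem?_eq_none (by omega)
    rw [List.getD_eq_getElem?_getD, List.getD_eq_getElem?_getD, e1, e2]

lemma wb_inner (v : Int) : ∀ (C : List (Int × Int)) (bd : List (List Int)),
    (∀ p ∈ C, 0 ≤ p.1 ∧ p.1 < (bd.length : Int) ∧ 0 ≤ p.2 ∧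
      p.2 < ((bd.getD p.1.toNat []).length : Int)) →
    RowLens (C.foldl (fun b q => bset b q.1 q.2 v) bd) = RowLens bd ∧
    ∀ p : Int × Int, 0 ≤ p.1 → 0 ≤ p.2 →
      bget (C.foldl (fun b q => bset b q.1 q.2 v) bd) p.1 p.2 =
        if p ∈ C then v else bget bd p.1 p.2 := by
  intro C
  induction C with
  | nil => intro bd _; exact ⟨rfl, fun p _ _ => by simp⟩
  | cons x C ih =>
    intro bd hin
    obtain ⟨hx0, hx1, hx2, hx3⟩ := hin x (List.mem_cons_self)
    have hsh1 : RowLens (bset bd x.1 x.2 v) = RowLens bd := rowLens_bset bd x.1 x.2 v hx0 hx2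
    have hlen1 : (bset bd x.1 x.2 v).length = bd.length := by
      have := congrArg List.length hsh1
      simpa [RowLens] using this
    have hin' : ∀ p ∈ C, 0 ≤ p.1 ∧ p.1 < ((bset bd x.1 x.2 v).length : Int) ∧ 0 ≤ p.2 ∧
        p.2 < (((bset bd x.1 x.2 v).getD p.1.toNat []).length : Int) := by
      intro p hp
      obtain ⟨h0, h1, h2, h3⟩ := hin p (List.mem_cons_of_mem _ hp)
      exact ⟨h0, by rw [hlen1]; exact h1, h2,
        by rw [getD_length_eq_of_rowLens hsh1]; exact h3⟩
    obtain ⟨ihsh, ihval⟩ := ih (bset bd x.1 x.2 v) hin'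
    refine ⟨by rw [List.foldl_cons, ihsh, hsh1], ?_⟩
    intro p h0 h0'
    rw [List.foldl_cons, ihval p h0 h0']
    by_cases hpC : p ∈ C
    · simp [hpC]
    · rw [if_neg hpC]
      by_cases hpx : p = x
      · subst hpx
        rw [if_pos (List.mem_cons_self)]
        exact bget_bset_same v hx0 hx1 hx2 hx3
      · rw [if_neg (by simp [hpx, hpC])]
        have : (p.1, p.2) ≠ (x.1, x.2) := by
          intro h
          exact hpx (Prod.ext (congrArg Prod.fst h) (congrArg Prod.snd h))
        exact bget_bset_ne v hx0 hx2 h0 h0' this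

def deadL (sinks : List (List (Int × Int) × Bool)) : List (Int × Int) :=
  sinks.flatMap (·.1)

lemma wb_outer {r c : Int} {board : List (List Int)}
    (hr : (board.length : Int) = r) (hrect : Rect c board) :
    ∀ (sinks : List (List (Int × Int) × Bool)) (bd : List (List Int)),
    (∀ C b, (C, b) ∈ sinks → ∀ p ∈ C, LandP c board p ∧ (b = false ↔ GoodP r c board p)) →
    RowLens bd = RowLens board →
    RowLens (sinks.foldl (fun bd cs =>
        cs.1.foldl (fun bd q => bset bd q.1 q.2 (if cs.2 then 0 else 1)) bd) bd) = RowLens board ∧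
    ∀ p : Int × Int, 0 ≤ p.1 → 0 ≤ p.2 →
      (p ∈ deadL sinks → GoodP r c board p →
        bget (sinks.foldl (fun bd cs =>
          cs.1.foldl (fun bd q => bset bd q.1 q.2 (if cs.2 then 0 else 1)) bd) bd) p.1 p.2 = 1) ∧
      (p ∈ deadL sinks → ¬ GoodP r c board p →
        bget (sinks.foldl (fun bd cs =>
          cs.1.foldl (fun bd q => bset bd q.1 q.2 (if cs.2 then 0 else 1)) bd) bd) p.1 p.2 = 0) ∧
      (p ∉ deadL sinks →
        bget (sinks.foldl (fun bd cs =>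
          cs.1.foldl (fun bd q => bset bd q.1 q.2 (if cs.2 then 0 else 1)) bd) bd) p.1 p.2
          = bget bd p.1 p.2) := by
  intro sinks
  induction sinks with
  | nil => intro bd _ hsh; exact ⟨hsh, fun p _ _ => ⟨fun h => by simp [deadL] at h,
      fun h => by simp [deadL] at h, fun _ => rfl⟩⟩
  | cons cs rest ih =>
    intro bd hvals hsh
    have hCin : ∀ p ∈ cs.1, 0 ≤ p.1 ∧ p.1 < (bd.length : Int) ∧ 0 ≤ p.2 ∧
        p.2 < ((bd.getD p.1.toNat []).length : Int) := by
      intro p hp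
      have hl := (hvals cs.1 cs.2 (by simp) p hp).1
      have hblen : bd.length = board.length := by
        have := congrArg List.length hsh
        simpa [RowLens] using this
      have hrow : (bd.getD p.1.toNat []).length = (board.getD p.1.toNat []).length :=
        getD_length_eq_of_rowLens hsh p.1.toNat
      have hkk : p.1.toNat < board.length := by
        have := hl.1.2.1; have h0 := hl.1.1; omega
      have hmem : board.getD p.1.toNat [] ∈ board := by
        rw [List.getD_eq_getElem?_getD, List.getElem?_eq_getElem hkk]
        exact List.getElem_mem hkk
      refine ⟨hl.1.1, by rw [hblen]; exact hl.1.2.1, hl.1.2.2.1, ?_⟩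
      rw [hrow]
      exact lt_of_lt_of_le hl.1.2.2.2 (hrect _ hmem)
    obtain ⟨hish, hival⟩ := wb_inner (if cs.2 then 0 else 1) cs.1 bd hCin
    obtain ⟨ihsh, ihval⟩ := ih _ (fun C b hCb => hvals C b (List.mem_cons_of_mem _ hCb))
      (hish.trans hsh)
    refine ⟨ihsh, ?_⟩
    intro p h0 h0'
    have hdead : p ∈ deadL (cs :: rest) ↔ p ∈ cs.1 ∨ p ∈ deadL rest := by
      simp [deadL]
    obtain ⟨ih1, ih2, ih3⟩ := ihval p h0 h0'
    refine ⟨?_, ?_, ?_⟩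
    · intro hp hg
      rcases hdead.mp hp with hp1 | hp2
      · by_cases hp2 : p ∈ deadL rest
        · exact ih1 hp2 hg
        · rw [List.foldl_cons, ih3 hp2, hival p h0 h0', if_pos hp1]
          have := (hvals cs.1 cs.2 (by simp) p hp1).2
          have hb : cs.2 = false := this.mpr hg
          simp [hb]
      · exact ih1 hp2 hg
    · intro hp hg
      rcases hdead.mp hp with hp1 | hp2
      · by_cases hp2 : p ∈ deadL rest
        · exact ih2 hp2 hg
        · rw [List.foldl_cons, ih3 hp2, hival p h0 h0', if_pos hp1]
          have := (hvals cs.1 cs.2 (by simp) p hp1).2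
          have hb : cs.2 = true := by
            by_contra hb
            exact hg (this.mp (by simpa using hb))
          simp [hb]
      · exact ih2 hp2 hg
    · intro hp
      rw [hdead] at hp
      push Not at hp
      rw [List.foldl_cons, ih3 hp.2, hival p h0 h0', if_neg hp.1]

lemma foldl_nested' {α β γ : Type} (L1 : List α) (L2 : List β) (h : γ → α → β → γ)
    (init : γ) :
    L1.foldl (fun st i => L2.foldl (fun st j => h st i j) st) init
      = (L1.flatMap (fun i => L2.map (fun j => (i, j)))).foldl (fun st p => h st p.1 p.2) init := by
  simpa using foldl_nested L1 L2 (fun st p => h st p.1 p.2) init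

def AStep (r c : Int) (st : List (List Int) × List (List (Int × Int) × Bool))
    (p : Int × Int) : List (List Int) × List (List (Int × Int) × Bool) :=
  if bget st.1 p.1 p.2 ≠ 0 then
    ((dfsA (countNZ st.1 + 1) r c st.1 p.1 p.2).1,
     st.2 ++ [((dfsA (countNZ st.1 + 1) r c st.1 p.1 p.2).2.1,
               !(dfsA (countNZ st.1 + 1) r c st.1 p.1 p.2).2.2)])
  else st

lemma A_loop {r c : Int} {board : List (List Int)}
    (hr : (board.length : Int) = r) (hrect : Rect c board) :
    ∀ (L done : List (Int × Int)) (st : List (List Int) × List (List (Int × Int) × Bool)),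
    (∀ p ∈ L, Inb r c p) →
    EraseEq board (deadL st.2) st.1 →
    (∀ C b, (C, b) ∈ st.2 → ∀ p ∈ C, LandP c board p ∧ (b = false ↔ GoodP r c board p)) →
    ClosedC c board (deadL st.2) →
    (∀ p ∈ done, LandP c board p → p ∈ deadL st.2) →
    EraseEq board (deadL (L.foldl (AStep r c) st).2) (L.foldl (AStep r c) st).1 ∧
    (∀ C b, (C, b) ∈ (L.foldl (AStep r c) st).2 →
      ∀ p ∈ C, LandP c board p ∧ (b = false ↔ GoodP r c board p)) ∧
    (∀ p, (p ∈ done ∨ p ∈ L) → LandP c board p → p ∈ deadL (L.foldl (AStep r c) st).2) := by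
  intro L
  induction L with
  | nil =>
    intro done st _ hE hvals hcl hcov
    refine ⟨hE, hvals, ?_⟩
    intro p hp hl
    rcases hp with hp | hp
    · exact hcov p hp hl
    · simp at hp
  | cons x L ih =>
    intro done st hL hE hvals hcl hcov
    have hlen : st.1.length = board.length := by
      have := congrArg List.length hE.1
      simpa [RowLens] using this
    have hrect1 : Rect c st.1 := rect_of_rowLens hE.1 hrect
    have hr1 : (st.1.length : Int) = r := by rw [hlen]; exact hr
    have hInb := hL x (List.mem_cons_self)
    rw [List.foldl_cons]
    by_cases ht : bget st.1 x.1 x.2 ≠ 0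
    · have hstep : AStep r c st x =
          ((dfsA (countNZ st.1 + 1) r c st.1 x.1 x.2).1,
           st.2 ++ [((dfsA (countNZ st.1 + 1) r c st.1 x.1 x.2).2.1,
                     !(dfsA (countNZ st.1 + 1) r c st.1 x.1 x.2).2.2)]) := by
        unfold AStep
        rw [if_pos ht]
      have hland1 : LandP c st.1 x :=
        ⟨⟨hInb.1, by rw [hr1]; exact hInb.2.1, hInb.2.2⟩, ht⟩
      obtain ⟨hC, hEC, _, _, hflag⟩ :=
        dfsA_spec (countNZ st.1 + 1) st.1 x.1 x.2 hrect1 hr1 (lt_add_one _)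
      have hCx : ∀ q, q ∈ (dfsA (countNZ st.1 + 1) r c st.1 x.1 x.2).2.1 ↔
          LandP c st.1 x ∧ ConnP c st.1 x q := fun q => hC q
      have hboth := (land_eraseEq hE x).mp hland1
      have hlandb : LandP c board x := hboth.1
      have hxnot : x ∉ deadL st.2 := hboth.2
      have hCb : ∀ q, q ∈ (dfsA (countNZ st.1 + 1) r c st.1 x.1 x.2).2.1 ↔
          ConnP c board x q := by
        intro q
        rw [hCx q]
        constructor
        · rintro ⟨_, h2⟩
          exact (conn_erase_iff hE hcl hxnot).mp h2
        · intro h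
          exact ⟨hland1, (conn_erase_iff hE hcl hxnot).mpr h⟩
      have hdead' : deadL (st.2 ++ [((dfsA (countNZ st.1 + 1) r c st.1 x.1 x.2).2.1,
          !(dfsA (countNZ st.1 + 1) r c st.1 x.1 x.2).2.2)]) =
          deadL st.2 ++ (dfsA (countNZ st.1 + 1) r c st.1 x.1 x.2).2.1 := by
        simp [deadL]
      rw [hstep]
      have hflag' : (!(dfsA (countNZ st.1 + 1) r c st.1 x.1 x.2).2.2) = false ↔
          ∃ q ∈ (dfsA (countNZ st.1 + 1) r c st.1 x.1 x.2).2.1, BorderP r c q := by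
        rw [← hflag]
        simp
      have haE : EraseEq board (deadL (st.2 ++ [((dfsA (countNZ st.1 + 1) r c st.1 x.1 x.2).2.1,
          !(dfsA (countNZ st.1 + 1) r c st.1 x.1 x.2).2.2)]))
          (dfsA (countNZ st.1 + 1) r c st.1 x.1 x.2).1 := by
        rw [hdead']
        exact eraseEq_trans hE hEC
      have havals : ∀ C b, (C, b) ∈ st.2 ++ [((dfsA (countNZ st.1 + 1) r c st.1 x.1 x.2).2.1,
          !(dfsA (countNZ st.1 + 1) r c st.1 x.1 x.2).2.2)] →
          ∀ p ∈ C, LandP c board p ∧ (b = false ↔ GoodP r c board p) := by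
        intro C b hCb' p hp
        rcases List.mem_append.mp hCb' with hold | hnew
        · exact hvals C b hold p hp
        · have hCbe : C = (dfsA (countNZ st.1 + 1) r c st.1 x.1 x.2).2.1 ∧
              b = !(dfsA (countNZ st.1 + 1) r c st.1 x.1 x.2).2.2 := by
            have := List.mem_singleton.mp hnew
            exact ⟨congrArg Prod.fst this, congrArg Prod.snd this⟩
          obtain ⟨rfl, rfl⟩ := hCbe
          have hconn : ConnP c board x p := (hCb p).mp hp
          have hlp : LandP c board p := land_of_conn hconn hlandb
          refine ⟨hlp, ?_⟩
          rw [hflag']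
          constructor
          · rintro ⟨q, hq, hbq⟩
            exact ⟨q, hbq, (conn_symm hconn).trans ((hCb q).mp hq)⟩
          · rintro ⟨q, hbq, hq⟩
            exact ⟨q, (hCb q).mpr (hconn.trans hq), hbq⟩
      have hacl : ClosedC c board (deadL (st.2 ++ [((dfsA (countNZ st.1 + 1) r c st.1 x.1 x.2).2.1,
          !(dfsA (countNZ st.1 + 1) r c st.1 x.1 x.2).2.2)])) := by
        rw [hdead']
        intro p hp q hstepq
        rcases List.mem_append.mp hp with hp | hp
        · exact List.mem_append_left _ (hcl p hp q hstepq)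
        · exact List.mem_append_right _
            ((hCb q).mpr (((hCb p).mp hp).tail hstepq))
      have hacov : ∀ p ∈ done ++ [x], LandP c board p →
          p ∈ deadL (st.2 ++ [((dfsA (countNZ st.1 + 1) r c st.1 x.1 x.2).2.1,
            !(dfsA (countNZ st.1 + 1) r c st.1 x.1 x.2).2.2)]) := by
        intro p hp hlp
        rw [hdead']
        rcases List.mem_append.mp hp with hp | hp
        · exact List.mem_append_left _ (hcov p hp hlp)
        · rw [List.mem_singleton.mp hp]
          exact List.mem_append_right _ ((hCb x).mpr .refl)
      obtain ⟨r1, r2, r3⟩ := ih (done ++ [x])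
        ((dfsA (countNZ st.1 + 1) r c st.1 x.1 x.2).1,
         st.2 ++ [((dfsA (countNZ st.1 + 1) r c st.1 x.1 x.2).2.1,
                   !(dfsA (countNZ st.1 + 1) r c st.1 x.1 x.2).2.2)])
        (fun p hp => hL p (List.mem_cons_of_mem _ hp)) haE havals hacl hacov
      refine ⟨r1, r2, ?_⟩
      intro p hp hl
      apply r3 p ?_ hl
      rcases hp with hp | hp
      · exact Or.inl (List.mem_append_left _ hp)
      · rcases List.mem_cons.mp hp with rfl | hp
        · exact Or.inl (List.mem_append_right _ (List.mem_singleton.mpr rfl))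
        · exact Or.inr hp
    · have hstep : AStep r c st x = st := by
        unfold AStep
        rw [if_neg ht]
      rw [hstep]
      have hacov : ∀ p ∈ done ++ [x], LandP c board p → p ∈ deadL st.2 := by
        intro p hp hlp
        rcases List.mem_append.mp hp with hp | hp
        · exact hcov p hp hlp
        · rw [List.mem_singleton.mp hp] at hlp ⊢
          by_cases hxd : x ∈ deadL st.2
          · exact hxd
          · exfalso
            apply ht
            rw [hE.2 x hlp.1.1 hlp.1.2.2.1, if_neg hxd]
            exact hlp.2
      obtain ⟨r1, r2, r3⟩ := ih (done ++ [x]) st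
        (fun p hp => hL p (List.mem_cons_of_mem _ hp)) hE hvals hcl hacov
      refine ⟨r1, r2, ?_⟩
      intro p hp hl
      apply r3 p ?_ hl
      rcases hp with hp | hp
      · exact Or.inl (List.mem_append_left _ hp)
      · rcases List.mem_cons.mp hp with rfl | hp
        · exact Or.inl (List.mem_append_right _ (List.mem_singleton.mpr rfl))
        · exact Or.inr hp

def BStep (safe : List (Int × Int)) (bd : List (List Int)) (p : Int × Int) :
    List (List Int) :=
  if bget bd p.1 p.2 ≠ 0 then bset bd p.1 p.2 (if p ∈ safe then 1 else 0) else bd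

lemma B_loop {r c : Int} {board : List (List Int)} {safe : List (Int × Int)}
    (hr : (board.length : Int) = r) (hrect : Rect c board) :
    ∀ (L done : List (Int × Int)) (bd : List (List Int)),
    (∀ p ∈ L, Inb r c p) → (∀ p ∈ L, p ∉ done) → L.Nodup →
    RowLens bd = RowLens board →
    (∀ p : Int × Int, 0 ≤ p.1 → 0 ≤ p.2 →
      (p ∈ done → LandP c board p → bget bd p.1 p.2 = (if p ∈ safe then 1 else 0)) ∧
      (¬(p ∈ done ∧ LandP c board p) → bget bd p.1 p.2 = bget board p.1 p.2)) →
    RowLens (L.foldl (BStep safe) bd) = RowLens board ∧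
    (∀ p : Int × Int, 0 ≤ p.1 → 0 ≤ p.2 →
      ((p ∈ done ∨ p ∈ L) → LandP c board p →
        bget (L.foldl (BStep safe) bd) p.1 p.2 = (if p ∈ safe then 1 else 0)) ∧
      (¬((p ∈ done ∨ p ∈ L) ∧ LandP c board p) →
        bget (L.foldl (BStep safe) bd) p.1 p.2 = bget board p.1 p.2)) := by
  intro L
  induction L with
  | nil =>
    intro done bd _ _ _ hsh hval
    refine ⟨hsh, ?_⟩
    intro p h0 h0'
    obtain ⟨h1, h2⟩ := hval p h0 h0'
    constructor
    · rintro (hp | hp) hl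
      · exact h1 hp hl
      · simp at hp
    · intro h
      apply h2
      intro hcon
      exact h ⟨Or.inl hcon.1, hcon.2⟩
  | cons x L ih =>
    intro done bd hL hnd hLnd hsh hval
    have hblen : bd.length = board.length := by
      have := congrArg List.length hsh
      simpa [RowLens] using this
    have hInb := hL x (List.mem_cons_self)
    have hxdone : x ∉ done := hnd x (List.mem_cons_self)
    have hbx : bget bd x.1 x.2 = bget board x.1 x.2 :=
      (hval x hInb.1 hInb.2.2.1).2 (fun hcon => hxdone hcon.1)
    rw [List.foldl_cons]
    have hmemiff : ∀ p : Int × Int, (p ∈ done ++ [x] ∨ p ∈ L) ↔ (p ∈ done ∨ p ∈ x :: L) := by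
      intro p
      simp only [List.mem_append, List.mem_cons]
      tauto
    by_cases ht : bget bd x.1 x.2 ≠ 0
    · have hlx : LandP c board x :=
        ⟨⟨hInb.1, by rw [hr]; exact hInb.2.1, hInb.2.2⟩, by rw [← hbx]; exact ht⟩
      have hstep : BStep safe bd x = bset bd x.1 x.2 (if x ∈ safe then 1 else 0) := by
        unfold BStep
        rw [if_pos ht]
      rw [hstep]
      have hkk : x.1.toNat < board.length := by
        have := hInb.2.1; have h0 := hInb.1; omega
      have hrowmem : board.getD x.1.toNat [] ∈ board := by
        rw [List.getD_eq_getElem?_getD, List.getElem?_eq_getElem hkk]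
        exact List.getElem_mem hkk
      have hrl : x.2 < ((bd.getD x.1.toNat []).length : Int) := by
        rw [getD_length_eq_of_rowLens hsh]
        exact lt_of_lt_of_le hInb.2.2.2 (hrect _ hrowmem)
      have hsh1 : RowLens (bset bd x.1 x.2 (if x ∈ safe then 1 else 0)) = RowLens board :=
        (rowLens_bset bd x.1 x.2 _ hInb.1 hInb.2.2.1).trans hsh
      refine (ih (done ++ [x]) _ (fun p hp => hL p (List.mem_cons_of_mem _ hp))
        ?_ (List.nodup_cons.mp hLnd).2 hsh1 ?_).imp id ?_
      · intro p hp
        simp only [List.mem_append, List.mem_singleton]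
        rintro (hpd | rfl)
        · exact hnd p (List.mem_cons_of_mem _ hp) hpd
        · exact (List.nodup_cons.mp hLnd).1 hp
      · intro p h0 h0'
        obtain ⟨h1, h2⟩ := hval p h0 h0'
        by_cases hpx : p = x
        · subst hpx
          constructor
          · intro _ _
            rw [bget_bset_same _ hInb.1 (by rw [hblen, hr]; exact hInb.2.1) hInb.2.2.1 hrl]
          · intro hcon
            exact absurd ⟨List.mem_append_right _ (List.mem_singleton.mpr rfl), hlx⟩ hcon
        · have hne : (p.1, p.2) ≠ (x.1, x.2) := by
            intro h
            exact hpx (Prod.ext (congrArg Prod.fst h) (congrArg Prod.snd h))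
          have hbp : bget (bset bd x.1 x.2 (if x ∈ safe then 1 else 0)) p.1 p.2
              = bget bd p.1 p.2 := bget_bset_ne _ hInb.1 hInb.2.2.1 h0 h0' hne
          rw [hbp]
          constructor
          · intro hp hl
            rcases List.mem_append.mp hp with hp | hp
            · exact h1 hp hl
            · exact absurd (List.mem_singleton.mp hp) hpx
          · intro hcon
            apply h2
            intro hcon2
            exact hcon ⟨List.mem_append_left _ hcon2.1, hcon2.2⟩
      · intro hv p h0 h0'
        obtain ⟨h1, h2⟩ := hv p h0 h0'
        constructor
        · intro hp hl
          exact h1 ((hmemiff p).mpr hp) hl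
        · intro hcon
          apply h2
          intro hcon2
          exact hcon ⟨(hmemiff p).mp hcon2.1, hcon2.2⟩
    · have hnlx : ¬ LandP c board x := by
        intro hl
        apply ht
        rw [hbx]
        exact hl.2
      have hstep : BStep safe bd x = bd := by
        unfold BStep
        rw [if_neg ht]
      rw [hstep]
      refine (ih (done ++ [x]) bd (fun p hp => hL p (List.mem_cons_of_mem _ hp))
        ?_ (List.nodup_cons.mp hLnd).2 hsh ?_).imp id ?_
      · intro p hp
        simp only [List.mem_append, List.mem_singleton]
        rintro (hpd | rfl)
        · exact hnd p (List.mem_cons_of_mem _ hp) hpd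
        · exact (List.nodup_cons.mp hLnd).1 hp
      · intro p h0 h0'
        obtain ⟨h1, h2⟩ := hval p h0 h0'
        constructor
        · intro hp hl
          rcases List.mem_append.mp hp with hp | hp
          · exact h1 hp hl
          · rw [List.mem_singleton.mp hp] at hl
            exact absurd hl hnlx
        · intro hcon
          apply h2
          intro hcon2
          exact hcon ⟨List.mem_append_left _ hcon2.1, hcon2.2⟩
      · intro hv p h0 h0'
        obtain ⟨h1, h2⟩ := hv p h0 h0'
        constructor
        · intro hp hl
          exact h1 ((hmemiff p).mpr hp) hl
        · intro hcon
          apply h2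
          intro hcon2
          exact hcon ⟨(hmemiff p).mp hcon2.1, hcon2.2⟩

-- ---------- characterizations of the two ports ----------
def OutVal (r c : Int) (bd : List (List Int)) (T : Int × Int → Prop)
    (p : Int × Int) (v : Int) : Prop :=
  (LandP c bd p → T p → v = 1) ∧ (LandP c bd p → ¬ T p → v = 0) ∧
  (¬ LandP c bd p → v = bget bd p.1 p.2)

lemma solve_char {board : List (List Int)} (hpre : Pre_solve board) :
    RowLens (solve board) = RowLens board ∧
    ∀ i j : Int, 0 ≤ i → 0 ≤ j →
      OutVal (board.length : Int) ((PySem.List.pyGetD board 0 []).length : Int) board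
        (GoodP (board.length : Int) ((PySem.List.pyGetD board 0 []).length : Int) board)
        (i, j) (bget (solve board) i j) := by
  obtain ⟨hne, hrowlen⟩ := hpre
  have hrect : Rect (((PySem.List.pyGetD board 0 []).length : Int)) board := by
    intro row hm
    exact_mod_cast hrowlen row hm
  have h1 : (PySem.List.pyRange 0 ((board.length : Int)) 1).foldl
      (fun st i => (PySem.List.pyRange 0 (((PySem.List.pyGetD board 0 []).length : Int)) 1).foldl
        (fun st j => AStep ((board.length : Int)) (((PySem.List.pyGetD board 0 []).length : Int)) st (i, j)) st)
      (board, ([] : List (List (Int × Int) × Bool)))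
      = (cellsL ((board.length : Int)) (((PySem.List.pyGetD board 0 []).length : Int))).foldl (AStep ((board.length : Int)) (((PySem.List.pyGetD board 0 []).length : Int)))
        (board, ([] : List (List (Int × Int) × Bool))) :=
    foldl_nested' _ _ _ _
  have h0 : solve board =
      ((PySem.List.pyRange 0 ((board.length : Int)) 1).foldl
        (fun st i => (PySem.List.pyRange 0 (((PySem.List.pyGetD board 0 []).length : Int)) 1).foldl
          (fun st j => AStep ((board.length : Int)) (((PySem.List.pyGetD board 0 []).length : Int)) st (i, j)) st)
        (board, ([] : List (List (Int × Int) × Bool)))).2.foldl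
        (fun bd cs => cs.1.foldl (fun bd q => bset bd q.1 q.2 (if cs.2 then 0 else 1)) bd)
        ((PySem.List.pyRange 0 ((board.length : Int)) 1).foldl
          (fun st i => (PySem.List.pyRange 0 (((PySem.List.pyGetD board 0 []).length : Int)) 1).foldl
            (fun st j => AStep ((board.length : Int)) (((PySem.List.pyGetD board 0 []).length : Int)) st (i, j)) st)
          (board, ([] : List (List (Int × Int) × Bool)))).1 := rfl
  rw [h1] at h0
  obtain ⟨hE, hvals, hcov⟩ := A_loop (r := ((board.length : Int))) (c := (((PySem.List.pyGetD board 0 []).length : Int))) rfl hrect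
    (cellsL ((board.length : Int)) (((PySem.List.pyGetD board 0 []).length : Int))) [] (board, [])
    (fun p hp => mem_cellsL.mp hp)
    (by simpa [deadL] using eraseEq_refl board)
    (by intro C b h; simp at h)
    (by intro p hp; simp [deadL] at hp)
    (by intro p hp; simp at hp)
  obtain ⟨hsh, hval⟩ := wb_outer (r := ((board.length : Int))) (c := (((PySem.List.pyGetD board 0 []).length : Int))) rfl hrect
    ((cellsL ((board.length : Int)) (((PySem.List.pyGetD board 0 []).length : Int))).foldl (AStep ((board.length : Int)) (((PySem.List.pyGetD board 0 []).length : Int))) (board, [])).2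
    ((cellsL ((board.length : Int)) (((PySem.List.pyGetD board 0 []).length : Int))).foldl (AStep ((board.length : Int)) (((PySem.List.pyGetD board 0 []).length : Int))) (board, [])).1
    hvals hE.1
  rw [h0]
  refine ⟨hsh, ?_⟩
  intro i j hi hj
  obtain ⟨hv1, hv2, hv3⟩ := hval (i, j) hi hj
  have hInb : LandP (((PySem.List.pyGetD board 0 []).length : Int)) board (i, j) → (i, j) ∈ deadL
      ((cellsL ((board.length : Int)) (((PySem.List.pyGetD board 0 []).length : Int))).foldl (AStep ((board.length : Int)) (((PySem.List.pyGetD board 0 []).length : Int))) (board, [])).2 := by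
    intro hl
    exact hcov (i, j) (Or.inr (mem_cellsL.mpr hl.1)) hl
  refine ⟨fun hl hg => hv1 (hInb hl) hg, fun hl hg => hv2 (hInb hl) hg, ?_⟩
  intro hnl
  have hnd : (i, j) ∉ deadL ((cellsL ((board.length : Int)) (((PySem.List.pyGetD board 0 []).length : Int))).foldl (AStep ((board.length : Int)) (((PySem.List.pyGetD board 0 []).length : Int))) (board, [])).2 := by
    intro hd
    obtain ⟨C0, hC0⟩ := List.mem_flatMap.mp hd
    exact hnl (hvals C0.1 C0.2 (by simpa using hC0.1) _ hC0.2).1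
  rw [hv3 hnd, hE.2 (i, j) hi hj, if_neg hnd]

def seedsB (board : List (List Int)) : List (Int × Int) :=
  (PySem.List.pyRange 0 (board.length : Int) 1).flatMap (fun i =>
    ((PySem.List.pyRange 0 ((PySem.List.pyGetD board 0 []).length : Int) 1).filter (fun j =>
      (i == 0 || i == (board.length : Int) - 1 || j == 0 ||
        j == ((PySem.List.pyGetD board 0 []).length : Int) - 1) &&
      !(bget board i j == 0))).map (fun j => (i, j)))

def safeB (board : List (List Int)) : PySem.Set (Int × Int) :=
  floodB ((seedsB board).length + 5 * (board.length * (PySem.List.pyGetD board 0 []).length) + 1)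
    board (board.length : Int) ((PySem.List.pyGetD board 0 []).length : Int)
    (seedsB board) PySem.Set.empty

lemma solve_alt_char {board : List (List Int)} (hpre : Pre_solve board) :
    RowLens (solve_alt board) = RowLens board ∧
    ∀ i j : Int, 0 ≤ i → 0 ≤ j →
      OutVal (board.length : Int) ((PySem.List.pyGetD board 0 []).length : Int) board
        (ReachP (board.length : Int) ((PySem.List.pyGetD board 0 []).length : Int) board)
        (i, j) (bget (solve_alt board) i j) := by
  obtain ⟨hne, hrowlen⟩ := hpre
  have hrect : Rect (((PySem.List.pyGetD board 0 []).length : Int)) board := by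
    intro row hm
    exact_mod_cast hrowlen row hm
  have hstkc : ∀ p : Int × Int, p ∈ seedsB board ↔ SeedP ((board.length : Int)) (((PySem.List.pyGetD board 0 []).length : Int)) board p := by
    intro p
    unfold seedsB
    constructor
    · intro hmem
      simp only [List.mem_flatMap, List.mem_map, List.mem_filter,
        PySem.List.mem_pyRange_one] at hmem
      obtain ⟨i, hi, j, ⟨hj, hcond⟩, rfl⟩ := hmem
      simp only [Bool.and_eq_true, Bool.or_eq_true, beq_iff_eq, Bool.not_eq_true',
        beq_eq_false_iff_ne, ne_eq] at hcond
      exact ⟨⟨⟨hi.1, hi.2, hj.1, hj.2⟩, hcond.2⟩, by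
        rcases hcond.1 with ((h | h) | h) | h
        · exact Or.inl h
        · exact Or.inr (Or.inl h)
        · exact Or.inr (Or.inr (Or.inl h))
        · exact Or.inr (Or.inr (Or.inr h))⟩
    · rintro ⟨⟨hinb, hnz⟩, hbord⟩
      simp only [List.mem_flatMap, List.mem_map, List.mem_filter,
        PySem.List.mem_pyRange_one]
      refine ⟨p.1, ⟨hinb.1, hinb.2.1⟩, p.2, ⟨⟨hinb.2.2.1, hinb.2.2.2⟩, ?_⟩, rfl⟩
      simp only [Bool.and_eq_true, Bool.or_eq_true, beq_iff_eq, Bool.not_eq_true',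
        beq_eq_false_iff_ne, ne_eq]
      refine ⟨?_, hnz⟩
      rcases hbord with h | h | h | h
      · exact Or.inl (Or.inl (Or.inl h))
      · exact Or.inl (Or.inl (Or.inr h))
      · exact Or.inl (Or.inr h)
      · exact Or.inr h
  have hfeq : ∀ p : Int × Int, p ∈ safeB board ↔ ReachP ((board.length : Int)) (((PySem.List.pyGetD board 0 []).length : Int)) board p := by
    unfold safeB
    apply flood_spec (r := ((board.length : Int))) (c := (((PySem.List.pyGetD board 0 []).length : Int))) (bd := board) rfl
    · have hflt : (cellsL ((board.length : Int)) (((PySem.List.pyGetD board 0 []).length : Int))).filter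
          (fun p => !(decide (p ∈ PySem.Set.empty))) = cellsL ((board.length : Int)) (((PySem.List.pyGetD board 0 []).length : Int)) := by
        apply List.filter_eq_self.mpr
        intro a _
        simp [PySem.Set.empty]
      rw [hflt, length_cellsL (by positivity) (by positivity)]
      simp
    · intro p hp
      have hs := (hstkc p).mp hp
      exact ⟨hs.1, ⟨p, hs, .refl⟩⟩
    · intro p hp
      simp [PySem.Set.empty] at hp
    · intro s hs
      exact Or.inr ((hstkc s).mpr hs)
    · intro p hp
      simp [PySem.Set.empty] at hp
  have h1 : (PySem.List.pyRange 0 ((board.length : Int)) 1).foldl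
      (fun bd i => (PySem.List.pyRange 0 (((PySem.List.pyGetD board 0 []).length : Int)) 1).foldl
        (fun bd j => BStep (safeB board) bd (i, j)) bd) board
      = (cellsL ((board.length : Int)) (((PySem.List.pyGetD board 0 []).length : Int))).foldl (BStep (safeB board)) board :=
    foldl_nested' _ _ _ _
  have h0 : solve_alt board = (PySem.List.pyRange 0 ((board.length : Int)) 1).foldl
      (fun bd i => (PySem.List.pyRange 0 (((PySem.List.pyGetD board 0 []).length : Int)) 1).foldl
        (fun bd j => BStep (safeB board) bd (i, j)) bd) board := rfl
  rw [h1] at h0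
  obtain ⟨hsh, hval⟩ := B_loop (r := ((board.length : Int))) (c := (((PySem.List.pyGetD board 0 []).length : Int))) (board := board)
    (safe := safeB board) rfl hrect (cellsL ((board.length : Int)) (((PySem.List.pyGetD board 0 []).length : Int))) [] board
    (fun p hp => mem_cellsL.mp hp)
    (fun p _ h => by simp at h)
    nodup_cellsL
    rfl
    (fun p h0 h0' => ⟨fun hp => by simp at hp, fun _ => rfl⟩)
  rw [h0]
  refine ⟨hsh, ?_⟩
  intro i j hi hj
  obtain ⟨hv1, hv2⟩ := hval (i, j) hi hj
  refine ⟨?_, ?_, ?_⟩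
  · intro hl hreach
    rw [hv1 (Or.inr (mem_cellsL.mpr hl.1)) hl, if_pos ((hfeq (i, j)).mpr hreach)]
  · intro hl hreach
    rw [hv1 (Or.inr (mem_cellsL.mpr hl.1)) hl,
      if_neg (fun hmem => hreach ((hfeq (i, j)).mp hmem))]
  · intro hnl
    exact hv2 (fun hcon => hnl hcon.2)

-- ===== VERDICT (by name: the statement is the Claim_ definition above) =====
theorem solve_spec : Claim_equal_solve := by
  intro board _ hpre
  unfold Spec_solve
  obtain ⟨hshA, hvA⟩ := solve_char hpre
  obtain ⟨hshB, hvB⟩ := solve_alt_char hpre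
  apply ext_of_bget (hshA.trans hshB.symm)
  intro i j hi hj
  obtain ⟨hA1, hA2, hA3⟩ := hvA i j hi hj
  obtain ⟨hB1, hB2, hB3⟩ := hvB i j hi hj
  by_cases hl : LandP ((PySem.List.pyGetD board 0 []).length : Int) board (i, j)
  · by_cases hg : GoodP (board.length : Int)
        ((PySem.List.pyGetD board 0 []).length : Int) board (i, j)
    · rw [hA1 hl hg, hB1 hl ((good_iff_reach rfl hl).mp hg)]
    · rw [hA2 hl hg, hB2 hl (fun hr => hg ((good_iff_reach rfl hl).mpr hr))]
  · rw [hA3 hl, hB3 hl]
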